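-- pv_equiv track=rewrite | github.com/qarnot/qarnot-cli | QarnotCLI_Doc/CreateDoc/createDocMarkdown.py | parseUsage
-- ===== SOURCE A (Python) =====
-- def parseUsage(usage):
--     """
--     get a man and split it to it's different values
--     """
--     newUsage = usage.splitlines()
--     version = ""
--     copyrightQarnot = ""
--     UsageList = []
--     FlagList = []
--     step = 0
--     for line in newUsage:
--         if step == 0:
--             version = line
--             step += 1
--         elif step == 1:
--             copyrightQarnot = line
--             step += 1
--         elif step == 2:
--             UsageList.append(line)
--             if line.strip() == "":
--                 step += 1
--         elif step == 3:
--             FlagList.append(line)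
--     return version, copyrightQarnot, "\n".join(UsageList), "\n".join(FlagList)
-- ===== SOURCE B (Python) =====
-- def parseUsage(usage):
--     """
--     get a man and split it to it's different values
--     """
--     lines = usage.splitlines()
--     version = lines[0] if len(lines) > 0 else ""
--     copyrightQarnot = lines[1] if len(lines) > 1 else ""
--     rest = lines[2:]
--     for i, line in enumerate(rest):
--         if line.strip() == "":
--             return version, copyrightQarnot, "\n".join(rest[:i + 1]), "\n".join(rest[i + 1:])
--     return version, copyrightQarnot, "\n".join(rest), ""
-- ===== Notes on version B (the rewrite author's own statement) =====
-- stated objective: simpler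
-- what changed: Replaced A's four-state step machine with two-element accumulators by direct slicing: take lines[0], lines[1], then split lines[2:] at the first blank-stripped line and join the two slices.
import Mathlib
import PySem

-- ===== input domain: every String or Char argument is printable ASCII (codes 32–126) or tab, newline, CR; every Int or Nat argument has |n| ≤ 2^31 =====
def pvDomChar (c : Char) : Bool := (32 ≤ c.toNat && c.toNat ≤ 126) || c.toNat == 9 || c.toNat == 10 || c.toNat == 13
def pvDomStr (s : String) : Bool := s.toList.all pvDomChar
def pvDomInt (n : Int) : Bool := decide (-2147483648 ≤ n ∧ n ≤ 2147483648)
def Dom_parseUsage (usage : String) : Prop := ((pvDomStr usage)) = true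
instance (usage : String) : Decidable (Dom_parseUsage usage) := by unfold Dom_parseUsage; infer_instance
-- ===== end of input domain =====

-- B replaces A's four-state step machine by direct slicing around the first blank line (objective: simpler).

-- ===== PORT A =====
def parseUsageBody (st : Int × String × String × List String × List String) (line : String) :
    Int × String × String × List String × List String :=
  let (step, version, copyrightQarnot, UsageList, FlagList) := st
  if step == 0 then (step + 1, line, copyrightQarnot, UsageList, FlagList)
  else if step == 1 then (step + 1, version, line, UsageList, FlagList)
  else if step == 2 then
    if PySem.Str.strip line == "" then (step + 1, version, copyrightQarnot, UsageList ++ [line], FlagList)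
    else (step, version, copyrightQarnot, UsageList ++ [line], FlagList)
  else (step, version, copyrightQarnot, UsageList, FlagList ++ [line])

def parseUsage (usage : String) : String × String × String × String :=
  let newUsage := PySem.Str.splitlines usage
  let r := newUsage.foldl parseUsageBody (0, "", "", [], [])
  (r.2.1, r.2.2.1, PySem.Str.join "\n" r.2.2.2.1, PySem.Str.join "\n" r.2.2.2.2)

-- ===== PORT B =====
-- the enumerate loop of Source B: index of the first line whose strip is empty
def pvFindBlank : List String → Nat → Option Nat
  | [], _ => none
  | l :: ls, i => if PySem.Str.strip l == "" then some i else pvFindBlank ls (i + 1)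

def parseUsage_alt (usage : String) : String × String × String × String :=
  let lines := PySem.Str.splitlines usage
  let version := if lines.length > 0 then (PySem.List.pyGet? lines 0).getD "" else ""
  let copyrightQarnot := if lines.length > 1 then (PySem.List.pyGet? lines 1).getD "" else ""
  let rest := PySem.List.slice lines (some 2) none
  match pvFindBlank rest 0 with
  | some i =>
    (version, copyrightQarnot,
     PySem.Str.join "\n" (PySem.List.slice rest none (some ((i : Int) + 1))),
     PySem.Str.join "\n" (PySem.List.slice rest (some ((i : Int) + 1)) none))
  | none => (version, copyrightQarnot, PySem.Str.join "\n" rest, "")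

-- ===== PRECONDITION & SPEC =====
def Spec_parseUsage (usage : String) (out : String × String × String × String) : Prop := out = parseUsage_alt usage
instance (usage : String) (out : String × String × String × String) : Decidable (Spec_parseUsage usage out) := by unfold Spec_parseUsage; infer_instance

-- ===== CLAIM (what is proved, stated in full; the proofs are below) =====
def Claim_equal_parseUsage : Prop := ∀ (usage : String), Dom_parseUsage usage → Spec_parseUsage usage (parseUsage usage)

-- ===== LEMMAS AND PROOFS =====

theorem pvFindBlank_shift (ls : List String) (i : Nat) :
    pvFindBlank ls i = (pvFindBlank ls 0).map (· + i) := by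
  induction ls generalizing i with
  | nil => simp [pvFindBlank]
  | cons l ls ih =>
    by_cases h : PySem.Str.strip l == ""
    · simp [pvFindBlank, h]
    · simp only [pvFindBlank, h]
      rw [ih (i + 1), ih 1]
      cases pvFindBlank ls 0 with
      | none => simp
      | some v => simp; omega

theorem foldl_step3 (rest : List String) (v c : String) (ul fl : List String) :
    rest.foldl parseUsageBody (3, v, c, ul, fl) = (3, v, c, ul, fl ++ rest) := by
  induction rest generalizing fl with
  | nil => simp
  | cons l ls ih => simp [parseUsageBody, ih]

theorem foldl_step2 (rest : List String) (v c : String) (ul fl : List String) :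
    rest.foldl parseUsageBody (2, v, c, ul, fl) =
      match pvFindBlank rest 0 with
      | some i => (3, v, c, ul ++ rest.take (i + 1), fl ++ rest.drop (i + 1))
      | none => (2, v, c, ul ++ rest, fl) := by
  induction rest generalizing ul with
  | nil => simp [pvFindBlank]
  | cons l ls ih =>
    by_cases h : PySem.Str.strip l == ""
    · simp [pvFindBlank, h, parseUsageBody, foldl_step3]
    · simp only [pvFindBlank, h, List.foldl_cons, parseUsageBody]
      norm_num [h]
      rw [ih (ul ++ [l]), pvFindBlank_shift ls 1]
      cases pvFindBlank ls 0 <;> simp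

theorem parseUsage_spec_aux (usage : String) : parseUsage usage = parseUsage_alt usage := by
  unfold parseUsage parseUsage_alt
  match hL : PySem.Str.splitlines usage with
  | [] => simp [pvFindBlank, PySem.List.slice, PySem.Str.join, PySem.Chars.join, List.intercalate]
  | [a] => simp [parseUsageBody, pvFindBlank, PySem.List.slice, PySem.Str.join, PySem.Chars.join, List.intercalate]
  | a :: b :: rest =>
    simp only [List.foldl_cons, parseUsageBody]
    norm_num
    rw [foldl_step2]
    have h2 : PySem.List.slice (a :: b :: rest) (some 2) none = rest := by
      have := PySem.List.slice_from_natCast (a :: b :: rest) 2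
      simpa using this
    rw [h2]
    cases hF : pvFindBlank rest 0 with
    | none => simp [PySem.Str.join, PySem.Chars.join, List.intercalate]
    | some i =>
      have ht : PySem.List.slice rest none (some ((i : Int) + 1)) = rest.take (i + 1) := by
        have := PySem.List.slice_to_natCast rest (i + 1)
        simpa using this
      have hd : PySem.List.slice rest (some ((i : Int) + 1)) none = rest.drop (i + 1) := by
        have := PySem.List.slice_from_natCast rest (i + 1)
        simpa using this
      simp [ht, hd]

-- ===== VERDICT (by name: the statement is the Claim_ definition above) =====
theorem parseUsage_spec : Claim_equal_parseUsage := by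
  intro usage _
  unfold Spec_parseUsage
  exact parseUsage_spec_aux usage
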